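-- pv_equiv track=rewrite | github.com/n-tardieu/try-python-dash-ag-grid | utils/style.py | greenToRedScale
-- ===== SOURCE A (Python) =====
-- def greenToRedScale(n_bins:int):
--     res = []
--     length = int(n_bins/2)
--     if (length == n_bins/2):
--         for i in range(0, length):
--             res.append(f'rgb({int(i*255/(length - 1))}, 255, 0)')
--
--         for i in range(length - 1, -1, -1):
--             res.append(f'rgb(255, {int(i*255/(length - 1))}, 0)')
--
--     else:
--         for i in range(0, length):
--             res.append(f'rgb({int(i*255/(length))}, 255, 0)')
--
--         res.append('rgb(255, 255, 0)')
--
--         for i in range(length - 1, -1, -1):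
--             res.append(f'rgb(255, {int(i*255/(length))}, 0)')
--
--     return res
-- ===== SOURCE B (Python) =====
-- def greenToRedScale(n_bins: int):
--     # One loop over the output positions; each position is mapped directly to its
--     # string by index arithmetic (second half mirrors via total-1-j), instead of
--     # three staged passes (ascending loop, middle append, descending loop).
--     length = int(n_bins / 2)
--     even = (length == n_bins / 2)
--     div = length - 1 if even else length
--     k = max(length, 0)
--     total = 2 * k + (0 if even else 1)
--     out = []
--     for j in range(total):
--         if j < k:
--             out.append(f'rgb({j * 255 // div}, 255, 0)')
--         elif not even and j == k:
--             out.append('rgb(255, 255, 0)')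
--         else:
--             out.append(f'rgb(255, {(total - 1 - j) * 255 // div}, 0)')
--     return out
-- ===== Notes on version B (the rewrite author's own statement) =====
-- stated objective: alternative
-- what changed: B replaces A's three staged passes (ascending green loop, optional middle append, descending red loop) by one loop over the output index that maps each position directly to its string, mirroring the second half via total-1-j instead of iterating a reversed range.
-- outside the precondition, e.g. on greenToRedScale(2): A raises ZeroDivisionError, B raises ZeroDivisionError
import Mathlib
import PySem

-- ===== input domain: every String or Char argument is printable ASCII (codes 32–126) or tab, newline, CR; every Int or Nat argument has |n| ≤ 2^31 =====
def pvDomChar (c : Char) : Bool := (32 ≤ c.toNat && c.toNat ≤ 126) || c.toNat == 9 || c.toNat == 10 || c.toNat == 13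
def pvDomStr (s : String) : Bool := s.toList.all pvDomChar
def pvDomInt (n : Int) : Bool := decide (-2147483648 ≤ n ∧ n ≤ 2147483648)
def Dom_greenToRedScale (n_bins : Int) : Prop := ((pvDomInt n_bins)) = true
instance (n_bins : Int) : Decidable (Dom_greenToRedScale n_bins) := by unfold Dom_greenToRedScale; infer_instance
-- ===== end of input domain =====

-- B builds the list in ONE loop over the output index, mapping each position to its string by
-- index arithmetic (second half mirrored via total-1-j), instead of A's three staged passes
-- (objective: alternative decomposition, same cost); equivalence outside n_bins = 2, where A raises.

-- ===== PORT A =====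
-- int(n_bins/2): exact on Dom (the float n_bins/2 is exact for |n_bins| ≤ 2^31; int truncates toward zero = Int.tdiv)
-- (length == n_bins/2): exact on Dom, holds iff 2*length = n_bins
-- int(i*255/d): on every executed division i ≥ 0 and (given Pre_) d > 0, and i*255 ≤ 2^53,
-- so the float division cannot round across an integer and int(·) = floor division (PySem.Int.floordiv)
def greenToRedScale (n_bins : Int) : List String :=
  let length : Int := Int.tdiv n_bins 2
  if 2 * length == n_bins then
    let res := (PySem.List.pyRange 0 length 1).foldl
      (fun res i => res ++ ["rgb(" ++ PySem.Int.toStr (PySem.Int.floordiv (i * 255) (length - 1)) ++ ", 255, 0)"]) []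
    (PySem.List.pyRange (length - 1) (-1) (-1)).foldl
      (fun res i => res ++ ["rgb(255, " ++ PySem.Int.toStr (PySem.Int.floordiv (i * 255) (length - 1)) ++ ", 0)"]) res
  else
    let res := (PySem.List.pyRange 0 length 1).foldl
      (fun res i => res ++ ["rgb(" ++ PySem.Int.toStr (PySem.Int.floordiv (i * 255) length) ++ ", 255, 0)"]) []
    let res := res ++ ["rgb(255, 255, 0)"]
    (PySem.List.pyRange (length - 1) (-1) (-1)).foldl
      (fun res i => res ++ ["rgb(255, " ++ PySem.Int.toStr (PySem.Int.floordiv (i * 255) length) ++ ", 0)"]) res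

-- ===== PORT B =====
-- same float-exactness notes as for port A; `// div` is PySem.Int.floordiv
def greenToRedScale_alt (n_bins : Int) : List String :=
  let length : Int := Int.tdiv n_bins 2
  let even : Bool := 2 * length == n_bins
  let div : Int := if even then length - 1 else length
  let k : Int := max length 0
  let total : Int := 2 * k + (if even then 0 else 1)
  (PySem.List.pyRange 0 total 1).foldl
    (fun out j => out ++
      [if j < k then
        "rgb(" ++ PySem.Int.toStr (PySem.Int.floordiv (j * 255) div) ++ ", 255, 0)"
      else if !even && j == k then
        "rgb(255, 255, 0)"
      else
        "rgb(255, " ++ PySem.Int.toStr (PySem.Int.floordiv ((total - 1 - j) * 255) div) ++ ", 0)"]) []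

-- ===== PRECONDITION & SPEC =====
-- Pre_ excludes only n_bins = 2, on which A (and B) raise ZeroDivisionError
def Pre_greenToRedScale (n_bins : Int) : Prop := n_bins ≠ 2
instance (n_bins : Int) : Decidable (Pre_greenToRedScale n_bins) := by unfold Pre_greenToRedScale; infer_instance
def pvWitness_greenToRedScale : Int := 5
def Spec_greenToRedScale (n_bins : Int) (out : List String) : Prop := out = greenToRedScale_alt n_bins
instance (n_bins : Int) (out : List String) : Decidable (Spec_greenToRedScale n_bins out) := by unfold Spec_greenToRedScale; infer_instance

-- ===== CLAIM =====
def Claim_equal_greenToRedScale : Prop := ∀ (n_bins : Int), Dom_greenToRedScale n_bins → Pre_greenToRedScale n_bins → Spec_greenToRedScale n_bins (greenToRedScale n_bins)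

-- ===== LEMMAS AND PROOFS =====

-- ===== VERDICT =====
theorem greenToRedScale_spec : Claim_equal_greenToRedScale := by
  intro n _ hpre
  unfold Spec_greenToRedScale greenToRedScale greenToRedScale_alt
  set L := Int.tdiv n 2 with hLdef
  cases hev : (2 * L == n : Bool) <;>
    simp only [hev, if_true, if_false, Bool.not_true, Bool.not_false, Bool.false_and,
      Bool.true_and, Bool.false_eq_true, beq_iff_eq, add_zero,
      PySem.List.foldl_append_singleton_eq_map, List.nil_append]
  · -- odd branch
    by_cases hpos : 0 < L
    · have hk : max L 0 = L := max_eq_left (le_of_lt hpos)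
      rw [hk]
      have hsplit : PySem.List.pyRange 0 (2*L+1) 1
          = PySem.List.pyRange 0 L 1 ++ (L :: PySem.List.pyRange (L+1) (2*L+1) 1) := by
        rw [PySem.List.pyRange_one_append 0 L (2*L+1) (by omega) (by omega),
            PySem.List.pyRange_one_cons (by omega : L < 2*L+1)]
      rw [hsplit, List.map_append, List.map_cons, List.append_assoc, List.singleton_append]
      congr 1
      · apply List.map_congr_left
        intro j hj
        have := (PySem.List.mem_pyRange_one.mp hj)
        rw [if_pos this.2]
      congr 1
      · rw [if_neg (lt_irrefl L), if_pos rfl]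
      · rw [PySem.List.pyRange_neg_one, PySem.List.pyRange_one, List.map_map, List.map_map,
            show (L - 1 - (-1)).toNat = (2*L+1 - (L+1)).toNat by omega]
        apply List.map_congr_left
        intro k hk2
        have hk3 : (k : Int) < L := by
          have := List.mem_range.mp hk2; omega
        simp only [Function.comp]
        rw [if_neg (by omega), if_neg (by omega),
            show L - 1 - (k:Int) = 2 * L + 1 - 1 - (L + 1 + (k:Int)) by ring]
    · have hk : max L 0 = 0 := max_eq_right (by omega)
      rw [hk,
          PySem.List.pyRange_one_eq_nil (a := 0) (b := L) (by omega),
          PySem.List.pyRange_neg_one_eq_nil (a := L - 1) (b := -1) (by omega)]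
      have h1 : PySem.List.pyRange 0 (2*0+1) 1 = [(0:Int)] := by decide
      rw [h1, List.map_cons, List.map_nil, if_neg (lt_irrefl 0), if_pos rfl]
      simp
  · -- even branch
    by_cases hpos : 0 < L
    · have hk : max L 0 = L := max_eq_left (le_of_lt hpos)
      rw [hk,
          PySem.List.pyRange_one_append 0 L (2*L) (by omega) (by omega),
          List.map_append]
      congr 1
      · apply List.map_congr_left
        intro j hj
        have := (PySem.List.mem_pyRange_one.mp hj)
        rw [if_pos this.2]
      · rw [PySem.List.pyRange_neg_one, PySem.List.pyRange_one, List.map_map, List.map_map,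
            show (L - 1 - (-1)).toNat = (2*L - L).toNat by omega]
        apply List.map_congr_left
        intro k hk2
        have hk3 : (k : Int) < L := by
          have := List.mem_range.mp hk2; omega
        simp only [Function.comp]
        rw [if_neg (by omega),
            show L - 1 - (k:Int) = 2 * L - 1 - (L + (k:Int)) by ring]
    · have hk : max L 0 = 0 := max_eq_right (by omega)
      rw [hk,
          PySem.List.pyRange_one_eq_nil (a := 0) (b := L) (by omega),
          PySem.List.pyRange_neg_one_eq_nil (a := L - 1) (b := -1) (by omega)]
      have h1 : PySem.List.pyRange 0 (2*0) 1 = ([] : List Int) := by decide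
      rw [h1]
      simp
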